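-- pv_equiv track=rewrite | github.com/ywy2090/WeDPR-Component | python/ppc_common/ppc_utils/ppc_model_config_parser.py | parse_read_homo_dataset_loop
-- ===== SOURCE A (Python) =====
-- def parse_read_homo_dataset_loop(participants):
--     loop_start = []
--     loop_end = []
--     start = ''
--     end = ''
--     for i in range(participants):
--         if i == 0 or i == participants - 1:
--             if i == 0:
--                 start = f'{start}source{i}_record_count'
--                 end = f'{start} + source{i + 1}_record_count'
--             else:
--                 start = f'{start} + source{i}_record_count'
--                 end = f'{start} + source{i + 1}_record_count'
--         else:
--             start = f'{start} + source{i}_record_count'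
--             end = f'{start} + source{i + 1}_record_count'
--         loop_start.append(start)
--         loop_end.append(end)
--     return participants - 1, loop_start[0:participants - 1], loop_end[0:participants - 1]
-- ===== SOURCE B (Python) =====
-- def parse_read_homo_dataset_loop(participants):
--     terms = [f'source{j}_record_count' for j in range(participants)]
--     prefixes = [' + '.join(terms[:k + 1]) for k in range(participants)]
--     return participants - 1, prefixes[:participants - 1], prefixes[1:participants]
-- ===== Notes on version B (the rewrite author's own statement) =====
-- stated objective: simpler
-- what changed: Replaces A's loop with two parallel accumulators and nested first/last special-casing by one comprehension of joined prefixes 'source0_record_count + ... + sourcek_record_count' and a shift-by-one slice for the end expressions.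
import Mathlib
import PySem

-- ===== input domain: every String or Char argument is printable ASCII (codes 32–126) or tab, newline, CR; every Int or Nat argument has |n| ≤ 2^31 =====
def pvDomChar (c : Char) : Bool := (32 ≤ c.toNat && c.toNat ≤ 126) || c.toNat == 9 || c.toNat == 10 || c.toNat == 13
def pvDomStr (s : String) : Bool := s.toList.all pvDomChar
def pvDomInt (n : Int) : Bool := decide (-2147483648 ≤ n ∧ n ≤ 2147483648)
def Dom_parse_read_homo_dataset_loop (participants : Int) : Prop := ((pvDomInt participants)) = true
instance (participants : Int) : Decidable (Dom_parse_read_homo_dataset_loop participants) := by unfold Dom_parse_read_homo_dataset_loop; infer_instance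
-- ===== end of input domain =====

-- B replaces A's two parallel accumulators with nested first/last special-casing by one
-- joined-prefix list and a shift-by-one slice (objective: simpler).

-- ===== PORT A =====
-- loop body of A, one step per i (state = (loop_start, loop_end, start, end))
def pvStepA (participants : Int) (s : List String × List String × String × String)
    (i : Int) : List String × List String × String × String :=
  if i = 0 ∨ i = participants - 1 then
    if i = 0 then
      let start := s.2.2.1 ++ "source" ++ PySem.Int.toStr i ++ "_record_count"
      let e := start ++ " + source" ++ PySem.Int.toStr (i + 1) ++ "_record_count"
      (s.1 ++ [start], s.2.1 ++ [e], start, e)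
    else
      let start := s.2.2.1 ++ " + source" ++ PySem.Int.toStr i ++ "_record_count"
      let e := start ++ " + source" ++ PySem.Int.toStr (i + 1) ++ "_record_count"
      (s.1 ++ [start], s.2.1 ++ [e], start, e)
  else
    let start := s.2.2.1 ++ " + source" ++ PySem.Int.toStr i ++ "_record_count"
    let e := start ++ " + source" ++ PySem.Int.toStr (i + 1) ++ "_record_count"
    (s.1 ++ [start], s.2.1 ++ [e], start, e)

def parse_read_homo_dataset_loop (participants : Int) : Int × List String × List String :=
  let s := (PySem.List.pyRange 0 participants 1).foldl (pvStepA participants) ([], [], "", "")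
  (participants - 1,
   PySem.List.slice s.1 (some 0) (some (participants - 1)),
   PySem.List.slice s.2.1 (some 0) (some (participants - 1)))

-- ===== PORT B =====
def pvSrc (j : Int) : String := "source" ++ PySem.Int.toStr j ++ "_record_count"

def parse_read_homo_dataset_loop_alt (participants : Int) : Int × List String × List String :=
  let terms := (PySem.List.pyRange 0 participants 1).map pvSrc
  let prefixes := (PySem.List.pyRange 0 participants 1).map
    (fun k => PySem.Str.join " + " (PySem.List.slice terms none (some (k + 1))))
  (participants - 1,
   PySem.List.slice prefixes none (some (participants - 1)),
   PySem.List.slice prefixes (some 1) (some participants))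

-- ===== PRECONDITION & SPEC =====
def Spec_parse_read_homo_dataset_loop (participants : Int) (out : Int × List String × List String) : Prop := out = parse_read_homo_dataset_loop_alt participants
instance (participants : Int) (out : Int × List String × List String) : Decidable (Spec_parse_read_homo_dataset_loop participants out) := by unfold Spec_parse_read_homo_dataset_loop; infer_instance

-- ===== CLAIM (what is proved, stated in full; the proofs are below) =====
def Claim_equal_parse_read_homo_dataset_loop : Prop := ∀ (participants : Int), Dom_parse_read_homo_dataset_loop participants → Spec_parse_read_homo_dataset_loop participants (parse_read_homo_dataset_loop participants)

-- ===== LEMMAS AND PROOFS =====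

-- the k-th cumulative expression string
def pvP : Nat → String
  | 0 => pvSrc 0
  | n + 1 => pvP n ++ " + " ++ pvSrc ((n : Int) + 1)

-- string re-association: A's flat concatenation equals "s ++ ' + ' ++ pvSrc i"
lemma pvStr1 (s : String) (i : Int) :
    s ++ " + source" ++ PySem.Int.toStr i ++ "_record_count" = s ++ " + " ++ pvSrc i := by
  apply String.toList_inj.mp
  have h : (" + source" : String).toList = (" + " : String).toList ++ ("source" : String).toList := by decide
  simp [pvSrc, h]

lemma charsJoinApp (sep x : List Char) (l : List (List Char)) (h : l ≠ []) :
    PySem.Chars.join sep (l ++ [x]) = PySem.Chars.join sep l ++ sep ++ x := by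
  induction l with
  | nil => exact absurd rfl h
  | cons a l ih =>
    cases l with
    | nil => simp [PySem.Chars.join_cons_cons, PySem.Chars.join_singleton]
    | cons b l' =>
      rw [show (a :: b :: l') ++ [x] = a :: (b :: (l' ++ [x])) from by simp]
      rw [PySem.Chars.join_cons_cons, show b :: (l' ++ [x]) = (b :: l') ++ [x] from by simp,
          ih (by simp), PySem.Chars.join_cons_cons]
      simp [List.append_assoc]

lemma strJoinApp (sep x : String) (l : List String) (h : l ≠ []) :
    PySem.Str.join sep (l ++ [x]) = PySem.Str.join sep l ++ sep ++ x := by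
  unfold PySem.Str.join
  apply String.toList_inj.mp
  rw [List.map_append]
  simp [charsJoinApp sep.toList x.toList (l.map String.toList) (by simpa using h)]

-- B's joined prefix is pvP
lemma joinB (k : Nat) :
    PySem.Str.join " + " ((List.range (k + 1)).map (fun i : Nat => pvSrc (i : Int))) = pvP k := by
  induction k with
  | zero =>
    unfold PySem.Str.join
    apply String.toList_inj.mp
    simp [PySem.Chars.join_singleton, pvP, List.range_succ]
  | succ n ih =>
    rw [List.range_succ, List.map_append, List.map_singleton,
        strJoinApp _ _ _ (by simp [← List.length_eq_zero_iff]), ih]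
    show _ = pvP n ++ " + " ++ pvSrc ((n : Int) + 1)
    push_cast
    rfl

-- A's loop invariant: after folding range(n+1) the state is the prefix lists
lemma foldA (p : Int) (n : Nat) :
    (PySem.List.pyRange 0 ((n : Int) + 1) 1).foldl (pvStepA p) ([], [], "", "") =
      ((List.range (n + 1)).map pvP,
       (List.range (n + 1)).map (fun k => pvP (k + 1)),
       pvP n, pvP (n + 1)) := by
  induction n with
  | zero =>
    rw [show ((0 : Nat) : Int) + 1 = 0 + 1 from by norm_num, PySem.List.pyRange_one_singleton]
    simp only [List.foldl_cons, List.foldl_nil, pvStepA]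
    refine Prod.ext ?_ (Prod.ext ?_ (Prod.ext ?_ ?_)) <;>
      simp [pvP, pvSrc, pvStr1, List.range_succ]
  | succ n ih =>
    have h : PySem.List.pyRange 0 ((↑(n + 1) : Int) + 1) 1
        = PySem.List.pyRange 0 ((n : Int) + 1) 1 ++ [(n : Int) + 1] := by
      push_cast
      exact PySem.List.pyRange_one_succ_right (by positivity)
    rw [h, List.foldl_append, ih]
    have hne : ((n : Int) + 1) ≠ 0 := by omega
    have hstep : ∀ s, pvStepA p s ((n : Int) + 1) =
        (s.1 ++ [s.2.2.1 ++ " + source" ++ PySem.Int.toStr ((n : Int) + 1) ++ "_record_count"],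
         s.2.1 ++ [s.2.2.1 ++ " + source" ++ PySem.Int.toStr ((n : Int) + 1) ++ "_record_count"
                    ++ " + source" ++ PySem.Int.toStr ((n : Int) + 1 + 1) ++ "_record_count"],
         s.2.2.1 ++ " + source" ++ PySem.Int.toStr ((n : Int) + 1) ++ "_record_count",
         s.2.2.1 ++ " + source" ++ PySem.Int.toStr ((n : Int) + 1) ++ "_record_count"
          ++ " + source" ++ PySem.Int.toStr ((n : Int) + 1 + 1) ++ "_record_count") := by
      intro s
      unfold pvStepA
      split_ifs <;> rfl
    rw [List.foldl_cons, List.foldl_nil, hstep]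
    have e1 : pvP n ++ " + source" ++ PySem.Int.toStr ((n : Int) + 1) ++ "_record_count"
        = pvP (n + 1) := by rw [pvStr1]; rfl
    have e2 : pvP (n + 1) ++ " + source" ++ PySem.Int.toStr ((n : Int) + 1 + 1) ++ "_record_count"
        = pvP (n + 2) := by
      rw [pvStr1]
      show _ = pvP (n + 1) ++ " + " ++ pvSrc ((↑(n + 1) : Int) + 1)
      push_cast
      rfl
    refine Prod.ext ?_ (Prod.ext ?_ (Prod.ext ?_ ?_)) <;>
      simp [List.range_succ, e1, e2]

-- ===== VERDICT (by name: the statement is the Claim_ definition above) =====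
theorem parse_read_homo_dataset_loop_spec : Claim_equal_parse_read_homo_dataset_loop := by
  intro p _
  unfold Spec_parse_read_homo_dataset_loop parse_read_homo_dataset_loop parse_read_homo_dataset_loop_alt
  by_cases hp : p ≤ 0
  · rw [PySem.List.pyRange_one_eq_nil hp]
    simp [PySem.List.slice]
  · push Not at hp
    obtain ⟨m, rfl⟩ : ∃ m : Nat, p = (m : Int) + 1 := ⟨(p - 1).toNat, by omega⟩
    rw [foldA]
    have hpref : (PySem.List.pyRange 0 ((m : Int) + 1) 1).map
        (fun k => PySem.Str.join " + "
          (PySem.List.slice ((PySem.List.pyRange 0 ((m : Int) + 1) 1).map pvSrc) none (some (k + 1))))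
        = (List.range (m + 1)).map pvP := by
      rw [PySem.List.pyRange_one]
      simp only [sub_zero, List.map_map, Function.comp_def, zero_add]
      rw [show ((m : Int) + 1).toNat = m + 1 from by omega]
      refine List.map_congr_left fun j hj => ?_
      have hj' : j < m + 1 := List.mem_range.mp hj
      rw [show ((j : Int) + 1) = ((j + 1 : Nat) : Int) from by push_cast; ring,
          PySem.List.slice_to_natCast, ← List.map_take, List.take_range,
          show min (j + 1) (m + 1) = j + 1 from by omega]
      exact joinB j
    simp only
    rw [hpref, show ((m : Int) + 1 - 1) = (m : Int) from by ring]
    rw [PySem.List.slice_zero_start, PySem.List.slice_zero_start,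
        PySem.List.slice_to_natCast, PySem.List.slice_to_natCast,
        PySem.List.slice_toNat _ (by norm_num) (by positivity)]
    have htail : List.take (((m : Int) + 1).toNat - (1 : Int).toNat)
          ((List.map pvP (List.range (m + 1))).drop (1 : Int).toNat)
        = List.take m (List.map (fun k => pvP (k + 1)) (List.range (m + 1))) := by
      have h1 : ((m : Int) + 1).toNat - (1 : Int).toNat = m := by omega
      rw [h1, show ((1 : Int).toNat) = 1 from rfl]
      rw [← List.map_take, List.take_range, show min m (m + 1) = m from by omega,
          List.range_succ_eq_map, List.map_cons, List.drop_one, List.tail_cons, List.map_map,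
          List.take_of_length_le (by simp)]
      simp [Function.comp_def]
    rw [htail]
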